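-- pv_equiv track=rewrite | github.com/hpgavin/epframe | src/translations/epframe_v08.py | parse_fixity
-- ===== SOURCE A (Python) =====
-- def parse_fixity(fixity_str):
--     """
--     Parse fixity string to DOF flags
--     Input: string like 'X Y Z', '* Y *', 'x y z', etc.
--     Returns: (DFX, DFY, DFZ) where 1=free, 0=fixed
--     """
--     fixity_str = fixity_str.upper().strip()
--     parts = fixity_str.split()
--
--     # Initialize all as free (1)
--     dof = {'X': 1, 'Y': 1, 'Z': 1}
--
--     # Mark as fixed (0) if letter appears
--     for part in parts:
--         if part in ['X', 'Y', 'Z']: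
--             dof[part] = 0
--
--     return dof['X'], dof['Y'], dof['Z']
-- ===== SOURCE B (Python) =====
-- def parse_fixity(fixity_str):
--     """
--     Parse fixity string to DOF flags
--     Returns: (DFX, DFY, DFZ) where 1=free, 0=fixed
--     Single forward character scan (a small state machine): no tokenization,
--     no token list, no dict.  A letter X/Y/Z marks its DOF fixed exactly when
--     it stands alone between whitespace/string boundaries.
--     """
--     dfx = dfy = dfz = 1
--     cand = None       # a lone X/Y/Z letter pending confirmation at the next boundary
--     in_word = False   # inside a word already known not to be a lone X/Y/Z
--     for ch in fixity_str.upper():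
--         if ch.isspace():
--             if cand == 'X':
--                 dfx = 0
--             elif cand == 'Y':
--                 dfy = 0
--             elif cand == 'Z':
--                 dfz = 0
--             cand = None
--             in_word = False
--         elif in_word or cand is not None:
--             cand = None
--             in_word = True
--         elif ch in 'XYZ':
--             cand = ch
--         else:
--             in_word = True
--     if cand == 'X':
--         dfx = 0
--     elif cand == 'Y':
--         dfy = 0
--     elif cand == 'Z':
--         dfz = 0
--     return dfx, dfy, dfz
-- ===== Notes on version B (the rewrite author's own statement) =====
-- stated objective: alternative
-- what changed: Replaces A's strip/split tokenization plus a dict-mutating loop over tokens with a single forward character scan: a three-state machine (boundary / pending lone X-Y-Z candidate / inside word) that confirms a lone letter at each whitespace boundary, never building a token list or a dict.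
import Mathlib
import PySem

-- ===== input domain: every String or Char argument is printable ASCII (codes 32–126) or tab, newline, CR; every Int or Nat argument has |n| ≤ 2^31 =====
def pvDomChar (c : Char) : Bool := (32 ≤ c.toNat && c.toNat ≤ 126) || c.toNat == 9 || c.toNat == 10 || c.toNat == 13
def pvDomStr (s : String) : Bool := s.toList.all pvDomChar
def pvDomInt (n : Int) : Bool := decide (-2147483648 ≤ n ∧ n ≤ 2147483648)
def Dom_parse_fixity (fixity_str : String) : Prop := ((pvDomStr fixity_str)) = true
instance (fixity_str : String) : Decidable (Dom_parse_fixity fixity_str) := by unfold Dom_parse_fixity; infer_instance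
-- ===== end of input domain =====

-- B replaces A's tokenize-then-dict-loop with one forward character scan (a
-- small state machine detecting lone X/Y/Z letters between whitespace
-- boundaries); same value everywhere (objective: alternative).


-- ===== PORT A =====
def parse_fixity (fixity_str : String) : Int × Int × Int :=
  let fixity_str := PySem.Str.strip (PySem.Str.upper fixity_str)
  let parts := PySem.Str.split₀ fixity_str
  let dof : PySem.Dict String Int := PySem.Dict.ofList [("X", 1), ("Y", 1), ("Z", 1)]
  let dof := parts.foldl
    (fun d part => if part ∈ (["X", "Y", "Z"] : List String) then d.insert part 0 else d) dof
  (dof.getD "X" 1, dof.getD "Y" 1, dof.getD "Z" 1)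

-- ===== PORT B =====
-- the `if cand == 'X': dfx = 0 …` block (run at a whitespace boundary and at the end)
def pfMark (f : Int × Int × Int) (cand : Option Char) : Int × Int × Int :=
  if cand = some 'X' then (0, f.2.1, f.2.2)
  else if cand = some 'Y' then (f.1, 0, f.2.2)
  else if cand = some 'Z' then (f.1, f.2.1, 0)
  else f

-- one iteration of Source B's for-loop; state = (flags, cand, in_word)
-- (`ch in 'XYZ'` on a single char = membership in the three letters: exact)
def pfStep (st : (Int × Int × Int) × Option Char × Bool) (ch : Char) :
    (Int × Int × Int) × Option Char × Bool :=
  if PySem.Chars.isspace ch then (pfMark st.1 st.2.1, none, false)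
  else if st.2.2 || st.2.1.isSome then (st.1, none, true)
  else if ch = 'X' ∨ ch = 'Y' ∨ ch = 'Z' then (st.1, some ch, st.2.2)
  else (st.1, none, true)

def parse_fixity_alt (fixity_str : String) : Int × Int × Int :=
  let st := (PySem.Str.upper fixity_str).toList.foldl pfStep ((1, 1, 1), none, false)
  pfMark st.1 st.2.1

-- ===== PRECONDITION & SPEC =====
def Spec_parse_fixity (fixity_str : String) (out : Int × Int × Int) : Prop := out = parse_fixity_alt fixity_str
instance (fixity_str : String) (out : Int × Int × Int) : Decidable (Spec_parse_fixity fixity_str out) := by unfold Spec_parse_fixity; infer_instance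

-- ===== CLAIM (what is proved, stated in full; the proofs are below) =====
def Claim_equal_parse_fixity : Prop := ∀ (fixity_str : String), Dom_parse_fixity fixity_str → Spec_parse_fixity fixity_str (parse_fixity fixity_str)

-- ===== LEMMAS AND PROOFS =====

-- A's dict-mutation loop read off at a key k ∈ {X,Y,Z}: final value is 0 iff
-- k occurs among the tokens, else its initial value.
theorem pv_fold_getD (parts : List String) (d : PySem.Dict String Int) (k : String)
    (hk : k = "X" ∨ k = "Y" ∨ k = "Z") :
    (parts.foldl
      (fun d part => if part ∈ (["X", "Y", "Z"] : List String) then d.insert part 0 else d) d).getD k 1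
    = if k ∈ parts then 0 else d.getD k 1 := by
  induction parts generalizing d with
  | nil => simp
  | cons p ps ih =>
    simp only [List.foldl_cons]
    rw [ih]
    by_cases hp : p ∈ (["X", "Y", "Z"] : List String)
    · simp only [hp, if_true, PySem.Dict.getD_insert]
      by_cases hkp : k = p
      · subst hkp; simp
      · simp [List.mem_cons, hkp]
    · have hkp : k ≠ p := by rintro rfl; rcases hk with h | h | h <;> simp_all
      simp [hp, List.mem_cons, hkp]

-- the flags obtained from an initial triple f by the words of `parts`
def pvMarkW (f : Int × Int × Int) (parts : List (List Char)) : Int × Int × Int :=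
  (if ['X'] ∈ parts then 0 else f.1,
   if ['Y'] ∈ parts then 0 else f.2.1,
   if ['Z'] ∈ parts then 0 else f.2.2)

theorem pv_go_acc (cs : List Char) : ∀ cur acc,
    PySem.Chars.split₀.go cs cur acc = acc.reverse ++ PySem.Chars.split₀.go cs cur [] := by
  induction cs with
  | nil =>
    intro cur acc
    simp only [PySem.Chars.split₀.go]
    by_cases h : cur.isEmpty <;> simp [h]
  | cons c rest ih =>
    intro cur acc
    simp only [PySem.Chars.split₀.go]
    by_cases hs : PySem.Chars.isspace c
    · by_cases hc : cur.isEmpty <;> simp only [hs, hc, if_true, if_false]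
      · exact ih _ _
      · rw [ih [] (cur.reverse :: acc), ih [] [cur.reverse]]; simp
    · simp only [hs, if_false]; exact ih _ _

-- all-whitespace tail: the splitter just finalizes
theorem pv_go_ws (ws : List Char) (hws : ∀ c ∈ ws, PySem.Chars.isspace c = true) :
    ∀ cur acc, PySem.Chars.split₀.go ws cur acc = PySem.Chars.split₀.go [] cur acc := by
  induction ws with
  | nil => intro cur acc; rfl
  | cons c rest ih =>
    intro cur acc
    have hc : PySem.Chars.isspace c = true := hws c (by simp)
    have hrest : ∀ c ∈ rest, PySem.Chars.isspace c = true := fun c hc' => hws c (by simp [hc'])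
    simp only [PySem.Chars.split₀.go, hc, if_true]
    by_cases hcur : cur.isEmpty
    · rw [ih hrest]
      simp only [PySem.Chars.split₀.go]
      simp [List.isEmpty_iff.mp hcur, hcur]
    · rw [if_neg hcur, ih hrest]
      simp only [PySem.Chars.split₀.go]
      simp only [List.isEmpty_nil, if_true, List.reverse_cons]
      rw [if_neg hcur]
  
theorem pv_go_append_ws (xs ws : List Char) (hws : ∀ c ∈ ws, PySem.Chars.isspace c = true) :
    ∀ cur acc, PySem.Chars.split₀.go (xs ++ ws) cur acc = PySem.Chars.split₀.go xs cur acc := by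
  induction xs with
  | nil => intro cur acc; simpa using pv_go_ws ws hws cur acc
  | cons c rest ih =>
    intro cur acc
    simp only [List.cons_append, PySem.Chars.split₀.go]
    by_cases hs : PySem.Chars.isspace c <;> by_cases hc : cur.isEmpty <;>
      simp only [hs, hc, if_true, if_false] <;> exact ih _ _

theorem pv_split0_lstrip (cs : List Char) : ∀ acc,
    PySem.Chars.split₀.go (PySem.Chars.lstrip cs) [] acc = PySem.Chars.split₀.go cs [] acc := by
  induction cs with
  | nil => intro acc; rfl
  | cons c rest ih =>
    intro acc
    by_cases hs : PySem.Chars.isspace c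
    · have : PySem.Chars.lstrip (c :: rest) = PySem.Chars.lstrip rest := by
        simp [PySem.Chars.lstrip, List.dropWhile, hs]
      rw [this, ih]
      simp [PySem.Chars.split₀.go, hs]
    · have : PySem.Chars.lstrip (c :: rest) = c :: rest := by
        simp [PySem.Chars.lstrip, List.dropWhile, hs]
      rw [this]

theorem pv_split0_strip (cs : List Char) :
    PySem.Chars.split₀ (PySem.Chars.strip cs) = PySem.Chars.split₀ cs := by
  unfold PySem.Chars.split₀ PySem.Chars.strip PySem.Chars.rstrip
  have hdecomp : PySem.Chars.lstrip cs
      = (List.dropWhile PySem.Chars.isspace (PySem.Chars.lstrip cs).reverse).reverse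
        ++ (List.takeWhile PySem.Chars.isspace (PySem.Chars.lstrip cs).reverse).reverse := by
    rw [← List.reverse_append, List.takeWhile_append_dropWhile, List.reverse_reverse]
  have hws : ∀ c ∈ (List.takeWhile PySem.Chars.isspace (PySem.Chars.lstrip cs).reverse).reverse,
      PySem.Chars.isspace c = true := by
    intro c hc
    exact List.mem_takeWhile_imp (List.mem_reverse.mp hc)
  calc PySem.Chars.split₀.go (List.dropWhile PySem.Chars.isspace (PySem.Chars.lstrip cs).reverse).reverse [] []
      = PySem.Chars.split₀.go ((List.dropWhile PySem.Chars.isspace (PySem.Chars.lstrip cs).reverse).reverse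
          ++ (List.takeWhile PySem.Chars.isspace (PySem.Chars.lstrip cs).reverse).reverse) [] [] :=
        (pv_go_append_ws _ _ hws [] []).symm
    _ = PySem.Chars.split₀.go (PySem.Chars.lstrip cs) [] [] := by rw [← hdecomp]
    _ = PySem.Chars.split₀.go cs [] [] := pv_split0_lstrip cs []

-- applying the words one at a time
theorem pv_markW_cons (f : Int × Int × Int) (w : List Char) (parts : List (List Char)) :
    pvMarkW f (w :: parts) = pvMarkW (pvMarkW f [w]) parts := by
  unfold pvMarkW
  by_cases hx : w = ['X'] <;> by_cases hy : w = ['Y'] <;> by_cases hz : w = ['Z'] <;>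
    simp_all [List.mem_cons] <;> split_ifs <;> simp_all

-- pfMark on a confirmed lone letter = marking by that one-letter word
theorem pv_mark_none (f : Int × Int × Int) : pfMark f none = f := by
  simp [pfMark]

theorem pv_mark_single (f : Int × Int × Int) (c : Char) (h : c = 'X' ∨ c = 'Y' ∨ c = 'Z') :
    pfMark f (some c) = pvMarkW f [[c]] := by
  rcases h with rfl | rfl | rfl <;> simp [pfMark, pvMarkW]

theorem pv_markW_skip (f : Int × Int × Int) (w : List Char)
    (h : ∀ c, (c = 'X' ∨ c = 'Y' ∨ c = 'Z') → w ≠ [c]) : pvMarkW f [w] = f := by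
  have hX := h 'X' (Or.inl rfl)
  have hY := h 'Y' (Or.inr (Or.inl rfl))
  have hZ := h 'Z' (Or.inr (Or.inr rfl))
  simp [pvMarkW, Ne.symm hX, Ne.symm hY, Ne.symm hZ]

-- the simulation: B's character scan computes the word-membership flags of A
theorem pv_sim : ∀ (cs : List Char) (f : Int × Int × Int) (cand : Option Char) (inw : Bool)
    (cur : List Char),
    ((cand = none ∧ inw = false ∧ cur = []) ∨
     (∃ c, (c = 'X' ∨ c = 'Y' ∨ c = 'Z') ∧ cand = some c ∧ inw = false ∧ cur = [c]) ∨
     (cand = none ∧ inw = true ∧ cur ≠ [] ∧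
       ∀ c, (c = 'X' ∨ c = 'Y' ∨ c = 'Z') → cur ≠ [c])) →
    (let st := cs.foldl pfStep (f, cand, inw); pfMark st.1 st.2.1)
      = pvMarkW f (PySem.Chars.split₀.go cs cur []) := by
  intro cs
  induction cs with
  | nil =>
    intro f cand inw cur h
    simp only [List.foldl_nil]
    rcases h with ⟨hc, hi, hcur⟩ | ⟨c0, hXYZ, hc, hi, hcur⟩ | ⟨hc, hi, hne, hnot⟩
    · subst hc; subst hcur
      simp [pv_mark_none, pvMarkW, PySem.Chars.split₀.go]
    · subst hc; subst hcur
      simp only [PySem.Chars.split₀.go, List.isEmpty_cons, if_false, Bool.false_eq_true,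
        List.reverse_cons, List.reverse_nil, List.nil_append]
      exact pv_mark_single f c0 hXYZ
    · subst hc
      have hcur : cur.isEmpty = false := by simpa [List.isEmpty_iff] using hne
      simp only [PySem.Chars.split₀.go, hcur, Bool.false_eq_true, if_false, List.reverse_nil,
        List.reverse_cons, List.nil_append]
      rw [pv_mark_none, pv_markW_skip]
      intro c hc hcc
      exact hnot c hc (by rw [← List.reverse_reverse cur, hcc]; rfl)
  | cons c rest ih =>
    intro f cand inw cur h
    simp only [List.foldl_cons]
    by_cases hs : PySem.Chars.isspace c
    · have hstep : pfStep (f, cand, inw) c = (pfMark f cand, none, false) := by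
        simp [pfStep, hs]
      rw [hstep]
      rcases h with ⟨hc, hi, hcur⟩ | ⟨c0, hXYZ, hc, hi, hcur⟩ | ⟨hc, hi, hne, hnot⟩
      · subst hc; subst hcur
        simp only [PySem.Chars.split₀.go, hs, if_true, List.isEmpty_nil]
        rw [pv_mark_none]
        exact ih f none false [] (Or.inl ⟨rfl, rfl, rfl⟩)
      · subst hc; subst hcur
        simp only [PySem.Chars.split₀.go, hs, if_true, List.isEmpty_cons, Bool.false_eq_true,
          if_false, List.reverse_cons, List.reverse_nil, List.nil_append]
        rw [pv_go_acc]
        simp only [List.reverse_cons, List.reverse_nil, List.nil_append, List.singleton_append]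
        rw [pv_markW_cons f [c0], ← pv_mark_single f c0 hXYZ]
        exact ih (pfMark f (some c0)) none false [] (Or.inl ⟨rfl, rfl, rfl⟩)
      · subst hc
        have hcur : cur.isEmpty = false := by simpa [List.isEmpty_iff] using hne
        simp only [PySem.Chars.split₀.go, hs, if_true, hcur, Bool.false_eq_true, if_false]
        rw [pv_go_acc]
        simp only [List.reverse_cons, List.reverse_nil, List.nil_append, List.singleton_append]
        rw [pv_markW_cons f cur.reverse, pv_markW_skip f cur.reverse
          (fun d hd hdd => hnot d hd (by rw [← List.reverse_reverse cur, hdd]; rfl))]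
        rw [pv_mark_none]
        exact ih f none false [] (Or.inl ⟨rfl, rfl, rfl⟩)
    · have hgo : PySem.Chars.split₀.go (c :: rest) cur [] = PySem.Chars.split₀.go rest (c :: cur) [] := by
        simp [PySem.Chars.split₀.go, hs]
      rw [hgo]
      rcases h with ⟨hc, hi, hcur⟩ | ⟨c0, hXYZ, hc, hi, hcur⟩ | ⟨hc, hi, hne, hnot⟩
      · subst hc; subst hcur; subst hi
        by_cases hX : c = 'X' ∨ c = 'Y' ∨ c = 'Z'
        · have hstep : pfStep (f, none, false) c = (f, some c, false) := by
            simp [pfStep, hs, hX]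
          rw [hstep]
          exact ih f (some c) false [c] (Or.inr (Or.inl ⟨c, hX, rfl, rfl, rfl⟩))
        · have hstep : pfStep (f, none, false) c = (f, none, true) := by
            simp [pfStep, hs, hX]
          rw [hstep]
          refine ih f none true [c] (Or.inr (Or.inr ⟨rfl, rfl, by simp, ?_⟩))
          intro d hd hdd
          injection hdd with h1 _
          exact hX (h1 ▸ hd)
      · subst hc; subst hcur; subst hi
        have hstep : pfStep (f, some c0, false) c = (f, none, true) := by
          simp [pfStep, hs]
        rw [hstep]
        refine ih f none true (c :: [c0]) (Or.inr (Or.inr ⟨rfl, rfl, by simp, ?_⟩))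
        intro d _ hdd
        simp at hdd
      · subst hc; subst hi
        have hstep : pfStep (f, none, true) c = (f, none, true) := by
          simp [pfStep, hs]
        rw [hstep]
        refine ih f none true (c :: cur) (Or.inr (Or.inr ⟨rfl, rfl, by simp, ?_⟩))
        intro d _ hdd
        rw [List.cons.injEq] at hdd
        exact hne hdd.2

theorem pv_ofList_inj {w v : List Char} (h : String.ofList w = String.ofList v) : w = v := by
  have := congrArg String.toList h
  simpa using this

theorem pv_mem_map (k : List Char) (L : List (List Char)) :
    (String.ofList k ∈ L.map String.ofList) ↔ k ∈ L := by
  constructor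
  · intro h
    rcases List.mem_map.mp h with ⟨w, hw, he⟩
    rwa [← pv_ofList_inj he]
  · intro h
    exact List.mem_map.mpr ⟨k, h, rfl⟩

-- ===== VERDICT (by name: the statement is the Claim_ definition above) =====
theorem parse_fixity_spec : Claim_equal_parse_fixity := by
  intro s _
  unfold Spec_parse_fixity parse_fixity parse_fixity_alt
  simp only
  rw [pv_fold_getD _ _ _ (Or.inl rfl), pv_fold_getD _ _ _ (Or.inr (Or.inl rfl)),
      pv_fold_getD _ _ _ (Or.inr (Or.inr rfl))]
  have hB := pv_sim (PySem.Str.upper s).toList (1, 1, 1) none false [] (Or.inl ⟨rfl, rfl, rfl⟩)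
  simp only at hB
  rw [hB]
  have hparts : PySem.Str.split₀ (PySem.Str.strip (PySem.Str.upper s))
      = (PySem.Chars.split₀ (PySem.Str.upper s).toList).map String.ofList := by
    show (PySem.Chars.split₀ (PySem.Str.strip (PySem.Str.upper s)).toList).map String.ofList = _
    rw [PySem.Str.toList_strip, pv_split0_strip]
  rw [hparts]
  have hX : ("X" : String) = String.ofList ['X'] := by decide
  have hY : ("Y" : String) = String.ofList ['Y'] := by decide
  have hZ : ("Z" : String) = String.ofList ['Z'] := by decide
  rw [hX, hY, hZ]
  unfold pvMarkW PySem.Chars.split₀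
  simp only [pv_mem_map]
  split_ifs <;> simp <;> decide
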